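-- pv_equiv track=rewrite | github.com/planetis-m/fix_fuzzy | fix_keybindings.py | remove_unescaped_ampersand
-- ===== SOURCE A (Python) =====
-- def remove_unescaped_ampersand(msgstr, count_to_remove):
--   """
--   Remove only unescaped ampersands (&) from the string, leaving escaped ampersands (&&) intact.
--   `count_to_remove` specifies how many ampersands to remove.
--   """
--   result = []
--   i = 0
--   ampersands_removed = 0
--   while i < len(msgstr):
--     # Check for escaped ampersands (&&)
--     if msgstr[i:i+2] == '&&':
--       result.append('&&')
--       i += 2  # Skip both '&'
--     elif msgstr[i] == '&' and ampersands_removed < count_to_remove: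
--       # Remove the unescaped ampersand
--       ampersands_removed += 1
--       i += 1  # Skip this '&'
--     else:
--       result.append(msgstr[i])
--       i += 1
--   return ''.join(result)
-- ===== SOURCE B (Python) =====
-- def remove_unescaped_ampersand(msgstr, count_to_remove):
--   """
--   Remove only unescaped ampersands (&) from the string, leaving escaped ampersands (&&) intact.
--   `count_to_remove` specifies how many ampersands to remove.
--   """
--   remaining = count_to_remove
--   parts = []
--   for part in msgstr.split('&&'):
--     n = min(remaining, part.count('&'))
--     if n > 0:
--       parts.append(part.replace('&', '', n))
--       remaining -= n
--     else:
--       parts.append(part)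
--   return '&&'.join(parts)
-- ===== Notes on version B (the rewrite author's own statement) =====
-- stated objective: faster
-- what changed: Replaces the character-by-character index scan with a split('&&') / counted replace per segment / '&&'.join pipeline that threads a removal budget through the segments.
import Mathlib
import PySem

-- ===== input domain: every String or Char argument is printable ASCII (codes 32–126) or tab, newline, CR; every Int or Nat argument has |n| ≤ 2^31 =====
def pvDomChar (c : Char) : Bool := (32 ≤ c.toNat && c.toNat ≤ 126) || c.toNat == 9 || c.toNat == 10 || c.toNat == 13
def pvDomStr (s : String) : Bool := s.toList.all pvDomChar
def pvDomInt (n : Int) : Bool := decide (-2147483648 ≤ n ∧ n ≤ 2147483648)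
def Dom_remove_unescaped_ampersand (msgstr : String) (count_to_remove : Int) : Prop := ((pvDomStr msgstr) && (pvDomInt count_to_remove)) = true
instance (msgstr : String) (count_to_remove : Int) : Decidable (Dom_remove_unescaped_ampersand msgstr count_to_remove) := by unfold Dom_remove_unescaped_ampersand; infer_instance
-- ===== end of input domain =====

-- B replaces A's character-by-character index scan with a split-on-'&&' / counted-replace /
-- join-with-'&&' pipeline (measurably faster in a timing run; same return value everywhere, both total).

-- ===== PORT A =====
-- the while loop of A: patterns mirror `msgstr[i:i+2] == '&&'`, `msgstr[i] == '&'`, else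
def loopA : List Char → Int → Int → List Char
  | [], _, _ => []
  | '&' :: '&' :: rest, cnt, removed => '&' :: '&' :: loopA rest cnt removed
  | '&' :: rest, cnt, removed =>
      if removed < cnt then loopA rest cnt (removed + 1)
      else '&' :: loopA rest cnt removed
  | c :: rest, cnt, removed => c :: loopA rest cnt removed

def remove_unescaped_ampersand (msgstr : String) (count_to_remove : Int) : String :=
  String.mk (loopA msgstr.toList count_to_remove 0)

-- ===== PORT B =====
-- part.replace('&', '', n): removes the first n '&'s (exact for the nonnegative n B passes;
-- for n ≤ 0 it removes none, matching Python's count=0 — B's guard never passes a negative n)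
def pyReplaceAmp : List Char → Int → List Char
  | [], _ => []
  | c :: rest, n =>
      if c = '&' ∧ 0 < n then pyReplaceAmp rest (n - 1)
      else c :: pyReplaceAmp rest n

-- the for loop of B over the parts, threading `remaining`; part.count('&') is List.count
def altGo : List (List Char) → Int → List (List Char)
  | [], _ => []
  | p :: rest, remaining =>
      let n : Int := min remaining (p.count '&' : Int)
      if 0 < n then pyReplaceAmp p n :: altGo rest (remaining - n)
      else p :: altGo rest remaining

def remove_unescaped_ampersand_alt (msgstr : String) (count_to_remove : Int) : String :=
  String.mk (PySem.Chars.join ['&', '&']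
    (altGo (PySem.Chars.splitOn msgstr.toList ['&', '&']) count_to_remove))

-- ===== PRECONDITION & SPEC =====
def Spec_remove_unescaped_ampersand (msgstr : String) (count_to_remove : Int) (out : String) : Prop := out = remove_unescaped_ampersand_alt msgstr count_to_remove
instance (msgstr : String) (count_to_remove : Int) (out : String) : Decidable (Spec_remove_unescaped_ampersand msgstr count_to_remove out) := by unfold Spec_remove_unescaped_ampersand; infer_instance

-- ===== CLAIM (what is proved, stated in full; the proofs are below) =====
def Claim_equal_remove_unescaped_ampersand : Prop := ∀ (msgstr : String) (count_to_remove : Int), Dom_remove_unescaped_ampersand msgstr count_to_remove → Spec_remove_unescaped_ampersand msgstr count_to_remove (remove_unescaped_ampersand msgstr count_to_remove)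

-- ===== LEMMAS AND PROOFS =====

-- model of str.split('&&') as a direct structural recursion
def splitAmp : List Char → List (List Char)
  | [] => [[]]
  | '&' :: '&' :: rest => [] :: splitAmp rest
  | c :: rest =>
      match splitAmp rest with
      | h :: t => (c :: h) :: t
      | [] => [[c]]

theorem splitAmp_ne_nil (l : List Char) : splitAmp l ≠ [] := by
  fun_induction splitAmp l <;> simp_all

theorem splitAmp_cons_exists (l : List Char) : ∃ h t, splitAmp l = h :: t := by
  cases hs : splitAmp l with
  | nil => exact absurd hs (splitAmp_ne_nil l)
  | cons h t => exact ⟨h, t, rfl⟩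

theorem splitAmp_cons_ne (c : Char) (rest : List Char)
    (hc : ∀ r', ¬ (c = '&' ∧ rest = '&' :: r')) :
    splitAmp (c :: rest) =
      match splitAmp rest with
      | h :: t => (c :: h) :: t
      | [] => [[c]] := by
  rw [splitAmp.eq_def]
  split
  · simp_all
  · rename_i r' heq
    injection heq with h1 h2
    exact absurd ⟨h1, h2⟩ (hc r')
  · rename_i c' rest' hno heq
    injection heq with a b
    subst a; subst b
    rfl

-- prepend x onto the first piece
def consHd (x : List Char) : List (List Char) → List (List Char)
  | h :: t => (x ++ h) :: t
  | [] => [x]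

theorem splitOn_go_eq (fuel : Nat) (l cur : List Char) (acc : List (List Char))
    (hf : l.length < fuel) :
    PySem.Chars.splitOn.go ['&', '&'] fuel l cur acc =
      acc.reverse ++ consHd cur.reverse (splitAmp l) := by
  induction fuel generalizing l cur acc with
  | zero => omega
  | succ fuel ih =>
      cases l with
      | nil =>
          simp [PySem.Chars.splitOn.go, splitAmp, consHd]
      | cons c rest =>
          by_cases hp : (['&', '&'].isPrefixOf (c :: rest)) = true
          · obtain ⟨d, r', rfl⟩ : ∃ d r', rest = d :: r' := by
              cases rest with
              | nil => simp [List.isPrefixOf] at hp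
              | cons d r' => exact ⟨d, r', rfl⟩
            obtain ⟨h1, h2⟩ : '&' = c ∧ '&' = d := by
              simpa [List.isPrefixOf] using hp
            subst h1; subst h2
            rw [show PySem.Chars.splitOn.go ['&', '&'] (fuel + 1) ('&' :: '&' :: r') cur acc
                = PySem.Chars.splitOn.go ['&', '&'] fuel r' [] (cur.reverse :: acc) from by
              simp [PySem.Chars.splitOn.go, List.isPrefixOf]]
            rw [ih r' [] (cur.reverse :: acc) (by simp at hf ⊢; omega)]
            obtain ⟨h, t, hs⟩ := splitAmp_cons_exists r'
            rw [show splitAmp ('&' :: '&' :: r') = [] :: splitAmp r' from by simp [splitAmp]]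
            simp [hs, consHd]
          · have hc : ∀ r', ¬ (c = '&' ∧ rest = '&' :: r') := by
              rintro r' ⟨rfl, rfl⟩
              simp [List.isPrefixOf] at hp
            rw [show PySem.Chars.splitOn.go ['&', '&'] (fuel + 1) (c :: rest) cur acc
                = PySem.Chars.splitOn.go ['&', '&'] fuel rest (c :: cur) acc from by
              simp [PySem.Chars.splitOn.go, hp]]
            rw [ih rest (c :: cur) acc (by simp at hf ⊢; omega)]
            obtain ⟨h, t, hs⟩ := splitAmp_cons_exists rest
            rw [splitAmp_cons_ne c rest hc, hs]
            simp [consHd]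

theorem splitOn_eq_splitAmp (cs : List Char) :
    PySem.Chars.splitOn cs ['&', '&'] = splitAmp cs := by
  rw [PySem.Chars.splitOn, splitOn_go_eq cs.length.succ cs [] [] (by omega)]
  obtain ⟨h, t, hs⟩ := splitAmp_cons_exists cs
  simp [hs, consHd]

theorem pyReplaceAmp_nonpos (p : List Char) (n : Int) (h : n ≤ 0) :
    pyReplaceAmp p n = p := by
  induction p with
  | nil => rfl
  | cons c rest ih =>
      simp only [pyReplaceAmp]
      rw [if_neg (by rintro ⟨_, h2⟩; omega), ih]

theorem altGo_cons (p : List Char) (rest : List (List Char)) (r : Int) :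
    altGo (p :: rest) r =
      pyReplaceAmp p (min r (p.count '&' : Int)) ::
        altGo rest (r - max 0 (min r (p.count '&' : Int))) := by
  simp only [altGo]
  by_cases h : 0 < min r ((p.count '&' : Int))
  · rw [if_pos h]
    have hm : max 0 (min r ((p.count '&' : Int))) = min r ((p.count '&' : Int)) := by omega
    rw [hm]
  · rw [if_neg h, pyReplaceAmp_nonpos p _ (by omega)]
    have hm : max 0 (min r ((p.count '&' : Int))) = 0 := by omega
    rw [hm, sub_zero]

theorem join_cons_head (sep : List Char) (c : Char) (h : List Char) (t : List (List Char)) :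
    PySem.Chars.join sep ((c :: h) :: t) = c :: PySem.Chars.join sep (h :: t) := by
  cases t with
  | nil => rw [PySem.Chars.join_singleton, PySem.Chars.join_singleton]
  | cons q t => rw [PySem.Chars.join_cons_cons, PySem.Chars.join_cons_cons]; simp


theorem main_lemma (cs : List Char) (cnt removed : Int) :
    loopA cs cnt removed =
      PySem.Chars.join ['&', '&'] (altGo (splitAmp cs) (cnt - removed)) := by
  fun_induction loopA cs cnt removed with
  | case1 => simp [splitAmp, altGo, PySem.Chars.join_singleton]
  | case2 rest cnt removed ih =>
      obtain ⟨h, t, hht⟩ : ∃ h t, splitAmp rest = h :: t := by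
        cases hs : splitAmp rest with
        | nil => exact absurd hs (splitAmp_ne_nil rest)
        | cons h t => exact ⟨h, t, rfl⟩
      rw [show splitAmp ('&' :: '&' :: rest) = [] :: splitAmp rest from by simp [splitAmp]]
      rw [hht, altGo_cons]
      simp only [List.count_nil, Nat.cast_zero]
      have h1 : min (cnt - removed) (0 : Int) ≤ 0 := by omega
      rw [pyReplaceAmp_nonpos _ _ h1]
      have h2 : max 0 (min (cnt - removed) (0 : Int)) = 0 := by omega
      rw [h2, sub_zero, altGo_cons, PySem.Chars.join_cons_cons, ih, hht, altGo_cons]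
      simp
  | case3 rest cnt removed hlt hcnt ih =>
      obtain ⟨h, t, hs⟩ := splitAmp_cons_exists rest
      rw [splitAmp_cons_ne '&' rest (fun r' hr => hlt r' hr.2), hs, ih, hs,
        altGo_cons, altGo_cons]
      have hcc : ((('&' :: h).count '&' : Nat) : Int) = ((h.count '&' : Nat) : Int) + 1 := by
        simp
      have hn : 0 < min (cnt - removed) ((('&' :: h).count '&' : Nat) : Int) := by
        have h0 : (0 : Int) ≤ ((h.count '&' : Nat) : Int) := by positivity
        omega
      simp only [pyReplaceAmp]
      rw [if_pos ⟨trivial, hn⟩]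
      congr 2
      · congr 1
        omega
      · congr 1
        omega
  | case4 rest cnt removed hlt hcnt ih =>
      obtain ⟨h, t, hs⟩ := splitAmp_cons_exists rest
      rw [splitAmp_cons_ne '&' rest (fun r' hr => hlt r' hr.2), hs, ih, hs,
        altGo_cons, altGo_cons]
      have hcc : ((('&' :: h).count '&' : Nat) : Int) = ((h.count '&' : Nat) : Int) + 1 := by
        simp
      have h0 : (0 : Int) ≤ ((h.count '&' : Nat) : Int) := by positivity
      rw [pyReplaceAmp_nonpos ('&' :: h) _ (by omega),
        pyReplaceAmp_nonpos h _ (by omega), join_cons_head]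
      congr 3
      congr 1
      omega
  | case5 c rest cnt removed hlt hne ih =>
      obtain ⟨h, t, hs⟩ := splitAmp_cons_exists rest
      have hcne : c ≠ '&' := fun hc => hne hc
      rw [splitAmp_cons_ne c rest (fun r' hr => absurd hr.1 hcne), hs, ih, hs,
        altGo_cons, altGo_cons]
      have hcc : (((c :: h).count '&' : Nat) : Int) = ((h.count '&' : Nat) : Int) := by
        simp [hcne]
      simp only [pyReplaceAmp]
      rw [if_neg (fun hp => hcne hp.1), join_cons_head, hcc]

-- ===== VERDICT (by name: the statement is the Claim_ definition above) =====
theorem remove_unescaped_ampersand_spec : Claim_equal_remove_unescaped_ampersand := by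
  intro msgstr cnt _
  unfold Spec_remove_unescaped_ampersand remove_unescaped_ampersand remove_unescaped_ampersand_alt
  rw [splitOn_eq_splitAmp]
  rw [show loopA msgstr.toList cnt 0 = _ from main_lemma msgstr.toList cnt 0]
  norm_num
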